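-- pv_equiv track=rewrite | github.com/aliang8/reward_fm | scripts/generate_sweep.py | _sanitize_val
-- ===== SOURCE A (Python) =====
-- from typing import Any, Dict, List
--
-- def _sanitize_val(v: Any) -> str:
--     if isinstance(v, list):
--         return "_".join(_sanitize_val(x) for x in v)
--     if isinstance(v, bool):
--         return "t" if v else "f"
--     s = str(v)
--     # Replace non-alnum with dash
--     out = []
--     for ch in s:
--         if ch.isalnum():
--             out.append(ch)
--         elif ch in [".", ":", "-"]:
--             out.append("-")
--         elif ch in [" ", ",", "/", "[", "]", "{", "}"]:
--             out.append("-")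
--         else:
--             out.append("-")
--     # Collapse multiple dashes
--     res = "".join(out)
--     while "--" in res:
--         res = res.replace("--", "-")
--     return res.strip("-")
-- ===== SOURCE B (Python) =====
-- from itertools import groupby
-- from typing import Any
--
-- def _sanitize_val(v: Any) -> str:
--     if isinstance(v, list):
--         return "_".join(_sanitize_val(x) for x in v)
--     if isinstance(v, bool):
--         return "t" if v else "f"
--     s = str(v)
--     return "-".join("".join(g) for k, g in groupby(s, key=str.isalnum) if k)
-- ===== Notes on version B (the rewrite author's own statement) =====
-- stated objective: idiomatic
-- what changed: Replaces the per-character dash substitution plus the repeated double-dash collapse loop and the final strip with a single itertools.groupby pass that keeps the maximal alnum runs and joins them with a dash separator.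
import Mathlib
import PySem

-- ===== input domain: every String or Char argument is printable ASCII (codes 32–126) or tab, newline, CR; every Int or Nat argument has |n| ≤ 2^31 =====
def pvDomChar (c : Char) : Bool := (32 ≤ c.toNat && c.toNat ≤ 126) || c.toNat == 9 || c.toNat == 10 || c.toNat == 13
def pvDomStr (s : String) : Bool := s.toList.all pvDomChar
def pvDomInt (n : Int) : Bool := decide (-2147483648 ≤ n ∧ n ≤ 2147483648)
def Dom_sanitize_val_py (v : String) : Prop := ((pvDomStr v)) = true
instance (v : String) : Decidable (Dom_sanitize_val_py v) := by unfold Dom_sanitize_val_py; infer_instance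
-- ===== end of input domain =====

-- B replaces A's per-char dash substitution + repeated '--'→'-' collapse loop + strip("-")
-- by one groupby pass joining the maximal alnum runs with '-' (idiomatic; return value only).

-- ===== PORT A =====
-- Helpers needed only for the termination of A's `while "--" in res` loop:
-- `Chars.replace res "--" "-"` acts as the one-pass rewriter pvRep2, which strictly
-- shrinks any string containing "--".
def pvRep2 : List Char → List Char
  | [] => []
  | [c] => [c]
  | a :: b :: t => if a = '-' ∧ b = '-' then '-' :: pvRep2 t else a :: pvRep2 (b :: t)

def pvHasDD : List Char → Bool
  | [] => false
  | [_] => false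
  | a :: b :: t => if a = '-' ∧ b = '-' then true else pvHasDD (b :: t)

theorem pvReplaceGo_eq (fuel : Nat) (l acc : List Char) (h : l.length ≤ fuel) :
    PySem.Chars.replace.go ['-', '-'] ['-'] fuel l acc = acc.reverse ++ pvRep2 l := by
  induction fuel generalizing l acc with
  | zero =>
    have : l = [] := by cases l <;> simp_all
    subst this
    simp [PySem.Chars.replace.go, pvRep2]
  | succ n ih =>
    match l with
    | [] => simp [PySem.Chars.replace.go, pvRep2]
    | [c] =>
      rw [PySem.Chars.replace.go]
      have hp : (['-', '-'] : List Char).isPrefixOf [c] = false := by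
        simp [List.isPrefixOf]
      simp only [hp]
      rw [ih [] (c :: acc) (by simp)]
      simp [pvRep2]
    | a :: b :: t =>
      rw [PySem.Chars.replace.go]
      by_cases hd : a = '-' ∧ b = '-'
      · obtain ⟨rfl, rfl⟩ := hd
        have hp : (['-', '-'] : List Char).isPrefixOf ('-' :: '-' :: t) = true := by
          simp [List.isPrefixOf]
        simp only [hp, if_true, List.length_cons, List.drop_succ_cons, List.length_nil, List.drop_zero]
        rw [ih t _ (by simp at h; omega)]
        simp [pvRep2]
      · have hp : (['-', '-'] : List Char).isPrefixOf (a :: b :: t) = false := by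
          rw [Bool.eq_false_iff]
          intro hc
          rcases List.isPrefixOf_iff_prefix.mp hc with ⟨r, hr⟩
          simp at hr
          exact hd ⟨hr.1.symm, hr.2.1.symm⟩
        simp only [hp]
        rw [ih (b :: t) _ (by simp at h ⊢; omega)]
        simp [pvRep2, hd]

theorem pvReplace_eq (l : List Char) :
    PySem.Chars.replace l ['-', '-'] ['-'] = pvRep2 l := by
  rw [PySem.Chars.replace]
  simp [pvReplaceGo_eq l.length l [] le_rfl]

theorem pvHasDD_cons (a : Char) (t : List Char) (h : pvHasDD t = true) :
    pvHasDD (a :: t) = true := by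
  match t with
  | [] => simp [pvHasDD] at h
  | b :: t' =>
    rw [pvHasDD]
    split <;> simp [h]

theorem pvInfix_iff (l : List Char) : ['-', '-'] <:+: l ↔ pvHasDD l = true := by
  constructor
  · rintro ⟨p, s, hs⟩
    subst hs
    induction p with
    | nil => simp [pvHasDD]
    | cons a p ih => exact pvHasDD_cons _ _ ih
  · intro h
    induction l with
    | nil => simp [pvHasDD] at h
    | cons a t ih =>
      match t, h with
      | b :: t', h =>
        rw [pvHasDD] at h
        by_cases hd : a = '-' ∧ b = '-'
        · obtain ⟨rfl, rfl⟩ := hd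
          exact ⟨[], t', rfl⟩
        · simp only [hd, if_false] at h
          exact (ih h).trans (List.infix_cons (List.infix_refl _))

theorem pvIsIn_eq (l : List Char) : PySem.Chars.isIn ['-', '-'] l = pvHasDD l := by
  by_cases h : pvHasDD l = true
  · rw [h, (PySem.Chars.isIn_iff_infix _ _).mpr ((pvInfix_iff l).mpr h)]
  · rw [Bool.not_eq_true] at h
    rw [h, (PySem.Chars.isIn_eq_false_iff _ _).mpr (fun hc => by
      rw [(pvInfix_iff l).mp hc] at h; exact Bool.true_eq_false.mp h)]

theorem pvRep2_length_le (l : List Char) : (pvRep2 l).length ≤ l.length := by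
  match l with
  | [] => simp [pvRep2]
  | [c] => simp [pvRep2]
  | a :: b :: t =>
    rw [pvRep2]
    split
    · have := pvRep2_length_le t
      simp; omega
    · have := pvRep2_length_le (b :: t)
      simp at this ⊢; omega

theorem pvRep2_length_lt (l : List Char) (h : pvHasDD l = true) :
    (pvRep2 l).length < l.length := by
  match l with
  | [] => simp [pvHasDD] at h
  | [c] => simp [pvHasDD] at h
  | a :: b :: t =>
    rw [pvRep2]
    rw [pvHasDD] at h
    split
    · have := pvRep2_length_le t
      simp; omega
    · rename_i hd
      simp only [hd, if_false] at h
      have := pvRep2_length_lt (b :: t) h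
      simp at this ⊢; omega

def pvCollapse (res : List Char) : List Char :=
  if PySem.Chars.isIn ['-', '-'] res then pvCollapse (PySem.Chars.replace res ['-', '-'] ['-']) else res
termination_by res.length
decreasing_by
  rw [pvReplace_eq]
  exact pvRep2_length_lt _ (by rename_i h; rwa [pvIsIn_eq] at h)

def sanitize_val_py (v : String) : String :=
  let out := v.toList.map (fun ch =>
    if PySem.Chars.isalnum ch then ch
    else if ['.', ':', '-'].contains ch then '-'
    else if [' ', ',', '/', '[', ']', '{', '}'].contains ch then '-'
    else '-')
  String.ofList (PySem.Chars.stripChars (pvCollapse out) ['-'])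

-- ===== PORT B =====
-- itertools.groupby(s, key=str.isalnum): maximal runs of equal key, in order
def pvGroupby (l : List Char) : List (Bool × List Char) :=
  match l with
  | [] => []
  | c :: t =>
    (PySem.Chars.isalnum c, c :: t.takeWhile (fun x => PySem.Chars.isalnum x == PySem.Chars.isalnum c))
      :: pvGroupby (t.dropWhile (fun x => PySem.Chars.isalnum x == PySem.Chars.isalnum c))
termination_by l.length
decreasing_by
  exact Nat.lt_succ_of_le (List.length_dropWhile_le _ _)

def sanitize_val_py_alt (v : String) : String :=
  String.ofList (PySem.Chars.join ['-']
    (((pvGroupby v.toList).filter (fun g => g.1)).map (fun g => g.2)))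

-- ===== PRECONDITION & SPEC =====
def Spec_sanitize_val_py (v : String) (out : String) : Prop := out = sanitize_val_py_alt v
instance (v : String) (out : String) : Decidable (Spec_sanitize_val_py v out) := by unfold Spec_sanitize_val_py; infer_instance

-- ===== CLAIM (what is proved, stated in full; the proofs are below) =====
def Claim_equal_sanitize_val_py : Prop := ∀ (v : String), Dom_sanitize_val_py v → Spec_sanitize_val_py v (sanitize_val_py v)

-- ===== LEMMAS AND PROOFS =====

-- the character substitution A performs
def pvF (c : Char) : Char := if PySem.Chars.isalnum c then c else '-'

-- the fixpoint of the collapse loop: squeeze adjacent dashes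
def pvSq : List Char → List Char
  | [] => []
  | [c] => [c]
  | a :: b :: t => if a = '-' ∧ b = '-' then pvSq (b :: t) else a :: pvSq (b :: t)

def pvTokens (l : List Char) : List (List Char) :=
  ((pvGroupby l).filter (fun g => g.1)).map (fun g => g.2)

def pvCore (l : List Char) : List Char := List.intercalate ['-'] (pvTokens l)

def pvLead (l : List Char) : List Char :=
  match l with
  | [] => []
  | c :: _ => if PySem.Chars.isalnum c then [] else ['-']

def pvTrail (l : List Char) : List Char :=
  if pvTokens l = [] then []
  else match l.getLast? with
    | none => []
    | some c => if PySem.Chars.isalnum c then [] else ['-']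

theorem pvSq_rep2_cons (l : List Char) : ∀ c, pvSq (c :: pvRep2 l) = pvSq (c :: l) := by
  match l with
  | [] => intro c; rfl
  | [a] => intro c; rfl
  | a :: b :: t =>
    intro c
    by_cases hd : a = '-' ∧ b = '-'
    · obtain ⟨rfl, rfl⟩ := hd
      rw [pvRep2]
      simp only [and_self, if_true]
      by_cases hc : c = '-'
      · subst hc
        rw [pvSq, if_pos ⟨rfl, rfl⟩, pvSq_rep2_cons t '-',
          show pvSq ('-' :: '-' :: '-' :: t) = pvSq ('-' :: '-' :: t) from
            by rw [pvSq, if_pos ⟨rfl, rfl⟩],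
          show pvSq ('-' :: '-' :: t) = pvSq ('-' :: t) from
            by rw [pvSq, if_pos ⟨rfl, rfl⟩]]
      · rw [pvSq, if_neg (by simp [hc]), pvSq_rep2_cons t '-',
          show pvSq (c :: '-' :: '-' :: t) = c :: pvSq ('-' :: '-' :: t) from
            by rw [pvSq, if_neg (by simp [hc])],
          show pvSq ('-' :: '-' :: t) = pvSq ('-' :: t) from
            by rw [pvSq, if_pos ⟨rfl, rfl⟩]]
    · rw [pvRep2, if_neg hd]
      by_cases hc : c = '-' ∧ a = '-'
      · obtain ⟨rfl, rfl⟩ := hc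
        rw [pvSq, if_pos ⟨rfl, rfl⟩, pvSq_rep2_cons (b :: t) '-',
          show pvSq ('-' :: '-' :: b :: t) = pvSq ('-' :: b :: t) from
            by rw [pvSq, if_pos ⟨rfl, rfl⟩]]
      · rw [pvSq, if_neg hc, pvSq_rep2_cons (b :: t) a,
          show pvSq (c :: a :: b :: t) = c :: pvSq (a :: b :: t) from
            by rw [pvSq, if_neg hc]]
termination_by l.length

theorem pvSq_rep2 (l : List Char) : pvSq (pvRep2 l) = pvSq l := by
  match l with
  | [] => rfl
  | [a] => rfl
  | a :: b :: t =>
    rw [pvRep2]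
    by_cases hd : a = '-' ∧ b = '-'
    · obtain ⟨rfl, rfl⟩ := hd
      simp only [and_self, if_true]
      rw [pvSq_rep2_cons t '-',
        show pvSq ('-' :: '-' :: t) = pvSq ('-' :: t) from
          by rw [pvSq, if_pos ⟨rfl, rfl⟩]]
    · rw [if_neg hd, pvSq_rep2_cons (b :: t) a]

theorem pvSq_noDD (l : List Char) (h : pvHasDD l = false) : pvSq l = l := by
  match l with
  | [] => rfl
  | [a] => rfl
  | a :: b :: t =>
    rw [pvHasDD] at h
    by_cases hd : a = '-' ∧ b = '-'
    · rw [if_pos hd] at h; exact absurd h (by simp)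
    · rw [if_neg hd] at h
      rw [pvSq, if_neg hd, pvSq_noDD (b :: t) h]

theorem pvCollapse_eq (l : List Char) : pvCollapse l = pvSq l := by
  rw [pvCollapse]
  by_cases h : pvHasDD l = true
  · have hlt := pvRep2_length_lt l h
    rw [pvIsIn_eq, h, if_pos rfl, pvReplace_eq, pvCollapse_eq (pvRep2 l), pvSq_rep2]
  · rw [Bool.not_eq_true] at h
    rw [pvIsIn_eq, h, pvSq_noDD l h]
    simp
termination_by l.length
decreasing_by simpa [pvReplace_eq] using hlt

-- basic squeeze lemmas
theorem pvSq_cons_ne (a : Char) (xs : List Char) (h : a ≠ '-') :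
    pvSq (a :: xs) = a :: pvSq xs := by
  match xs with
  | [] => rfl
  | b :: t => rw [pvSq, if_neg (by simp [h])]

theorem pvSq_cons_head (a : Char) (xs : List Char) (h : xs.head? ≠ some '-') :
    pvSq (a :: xs) = a :: pvSq xs := by
  match xs with
  | [] => rfl
  | b :: t =>
    simp only [List.head?_cons, ne_eq, Option.some.injEq] at h
    rw [pvSq, if_neg (by simp [h])]

theorem pvSq_replicate (n : Nat) (xs : List Char) :
    pvSq (List.replicate (n + 1) '-' ++ xs) = pvSq ('-' :: xs) := by
  induction n with
  | zero => rfl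
  | succ m ih =>
    rw [show List.replicate (m + 2) '-' ++ xs
        = '-' :: '-' :: (List.replicate m '-' ++ xs) from by
      simp [List.replicate_succ]]
    rw [pvSq, if_pos ⟨rfl, rfl⟩,
      show ('-' : Char) :: (List.replicate m '-' ++ xs)
          = List.replicate (m + 1) '-' ++ xs from by simp [List.replicate_succ]]
    exact ih

theorem pvSq_alnum_append (r xs : List Char) (h : ∀ a ∈ r, a ≠ '-') :
    pvSq (r ++ xs) = r ++ pvSq xs := by
  induction r with
  | nil => simp
  | cons a r' ih =>
    rw [List.cons_append, pvSq_cons_ne a _ (h a (by simp)),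
      ih (fun x hx => h x (by simp [hx]))]
    rfl

theorem pvAlnum_ne_dash (a : Char) (h : PySem.Chars.isalnum a = true) : a ≠ '-' := by
  intro hh; subst hh
  have : PySem.Chars.isalnum '-' = false := by decide
  rw [this] at h; exact Bool.false_ne_true h

-- token lemmas
theorem pvTokens_nil : pvTokens [] = [] := by
  rw [pvTokens, pvGroupby]; rfl

theorem pvTokens_cons_alnum (c : Char) (t : List Char) (h : PySem.Chars.isalnum c = true) :
    pvTokens (c :: t)
      = (c :: t.takeWhile (fun x => PySem.Chars.isalnum x == PySem.Chars.isalnum c))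
        :: pvTokens (t.dropWhile (fun x => PySem.Chars.isalnum x == PySem.Chars.isalnum c)) := by
  rw [pvTokens, pvGroupby, List.filter_cons]
  simp only [h, if_true, List.map_cons]
  rfl

theorem pvTokens_cons_not (c : Char) (t : List Char) (h : PySem.Chars.isalnum c = false) :
    pvTokens (c :: t)
      = pvTokens (t.dropWhile (fun x => PySem.Chars.isalnum x == PySem.Chars.isalnum c)) := by
  rw [pvTokens, pvGroupby, List.filter_cons]
  simp only [h, Bool.false_eq_true, if_false]
  rfl

theorem pvMem_of_mem_dropWhile {p : Char → Bool} {t : List Char} {a : Char}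
    (h : a ∈ t.dropWhile p) : a ∈ t :=
  (List.dropWhile_suffix p).subset h

theorem pvTokens_nil_iff (l : List Char) :
    pvTokens l = [] ↔ ∀ a ∈ l, PySem.Chars.isalnum a = false := by
  match l with
  | [] => simp [pvTokens_nil]
  | c :: t =>
    by_cases h : PySem.Chars.isalnum c = true
    · rw [pvTokens_cons_alnum c t h]
      constructor
      · intro habs; exact absurd habs (by simp)
      · intro hall; exact absurd (hall c (by simp)) (by simp [h])
    · rw [Bool.not_eq_true] at h
      rw [pvTokens_cons_not c t h,
        pvTokens_nil_iff (t.dropWhile (fun x => PySem.Chars.isalnum x == PySem.Chars.isalnum c))]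
      constructor
      · intro hall a ha
        rcases List.mem_cons.mp ha with rfl | ha
        · exact h
        · rcases (List.mem_append.mp (by rw [List.takeWhile_append_dropWhile (p := fun x => PySem.Chars.isalnum x == PySem.Chars.isalnum c)]; exact ha)) with htk | hdw
          · have := List.mem_takeWhile_imp htk
            rw [h] at this
            simpa using this
          · exact hall a hdw
      · intro hall a ha
        exact hall a (List.mem_cons_of_mem c (pvMem_of_mem_dropWhile ha))
termination_by l.length
decreasing_by exact Nat.lt_succ_of_le (List.length_dropWhile_le _ _)

theorem pvTokens_wf (l : List Char) :
    ∀ tk ∈ pvTokens l, tk ≠ [] ∧ ∀ a ∈ tk, PySem.Chars.isalnum a = true := by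
  match l with
  | [] => simp [pvTokens_nil]
  | c :: t =>
    by_cases h : PySem.Chars.isalnum c = true
    · rw [pvTokens_cons_alnum c t h]
      intro tk htk
      rcases List.mem_cons.mp htk with rfl | htk
      · refine ⟨by simp, ?_⟩
        intro a ha
        rcases List.mem_cons.mp ha with rfl | ha
        · exact h
        · have := List.mem_takeWhile_imp ha
          rw [h] at this
          simpa using this
      · exact pvTokens_wf _ tk htk
    · rw [Bool.not_eq_true] at h
      rw [pvTokens_cons_not c t h]
      exact pvTokens_wf _
termination_by l.length
decreasing_by all_goals exact Nat.lt_succ_of_le (List.length_dropWhile_le _ _)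

theorem pvGetLast?_suffix (rest l : List Char) (hs : rest <:+ l) (hne : rest ≠ []) :
    rest.getLast? = l.getLast? := by
  obtain ⟨p, rfl⟩ := hs
  rcases hr : rest.getLast? with _ | x
  · exact absurd (by simpa using congrArg Option.isSome hr) (by simpa using (List.getLast?_isSome).mpr hne)
  · rw [List.getLast?_append, hr, Option.some_or]

theorem pvMap_id (r : List Char) (h : ∀ a ∈ r, PySem.Chars.isalnum a = true) :
    r.map pvF = r := by
  induction r with
  | nil => rfl
  | cons a r' ih =>
    rw [List.map_cons, ih (fun x hx => h x (by simp [hx]))]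
    rw [pvF, if_pos (h a (by simp))]

theorem pvMap_rep (r : List Char) (h : ∀ a ∈ r, PySem.Chars.isalnum a = false) :
    r.map pvF = List.replicate r.length '-' := by
  induction r with
  | nil => rfl
  | cons a r' ih =>
    rw [List.map_cons, ih (fun x hx => h x (by simp [hx])), List.length_cons,
      List.replicate_succ]
    rw [pvF, if_neg (by simp [h a (by simp)])]

-- main structural lemma
theorem pvTrail_of_ne (l : List Char) (h : pvTokens l ≠ []) :
    pvTrail l = (match l.getLast? with
      | none => []
      | some c => if PySem.Chars.isalnum c then [] else ['-']) := by
  rw [pvTrail, if_neg h]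

theorem pvMain (l : List Char) :
    pvSq (l.map pvF) = pvLead l ++ pvCore l ++ pvTrail l := by
  match l with
  | [] => simp [pvSq, pvLead, pvCore, pvTokens_nil, pvTrail, List.intercalate]
  | c :: t =>
    have htc := List.takeWhile_append_dropWhile
      (p := fun x => PySem.Chars.isalnum x == PySem.Chars.isalnum c) (l := t)
    have hrec : (t.dropWhile (fun x => PySem.Chars.isalnum x == PySem.Chars.isalnum c)).length < (c :: t).length :=
      Nat.lt_succ_of_le (List.length_dropWhile_le _ _)
    have ih := pvMain (t.dropWhile (fun x => PySem.Chars.isalnum x == PySem.Chars.isalnum c))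
    have hwhole : (c :: t).map pvF
        = (c :: t.takeWhile (fun x => PySem.Chars.isalnum x == PySem.Chars.isalnum c)).map pvF
          ++ (t.dropWhile (fun x => PySem.Chars.isalnum x == PySem.Chars.isalnum c)).map pvF := by
      rw [← List.map_append, List.cons_append, htc]
    by_cases h : PySem.Chars.isalnum c = true
    · -- alnum head: run keeps its characters
      have hrun : ∀ a ∈ c :: t.takeWhile (fun x => PySem.Chars.isalnum x == PySem.Chars.isalnum c),
          PySem.Chars.isalnum a = true := by
        intro a ha
        rcases List.mem_cons.mp ha with rfl | ha
        · exact h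
        · have := List.mem_takeWhile_imp ha
          rw [h] at this
          simpa using this
      rw [hwhole, pvMap_id _ hrun,
        pvSq_alnum_append _ _ (fun a ha => pvAlnum_ne_dash a (hrun a ha)), ih]
      rw [pvLead, if_pos h, List.nil_append]
      rcases hrest : t.dropWhile (fun x => PySem.Chars.isalnum x == PySem.Chars.isalnum c) with _ | ⟨d, t'⟩
      · -- no rest: the whole string is one alnum run
        have hl : c :: t = c :: t.takeWhile (fun x => PySem.Chars.isalnum x == PySem.Chars.isalnum c) := by
          conv_lhs => rw [← htc]
          rw [hrest, List.append_nil]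
        have hcr : pvCore (c :: t)
            = c :: t.takeWhile (fun x => PySem.Chars.isalnum x == PySem.Chars.isalnum c) := by
          rw [pvCore, pvTokens_cons_alnum c t h, hrest, pvTokens_nil]
          simp [List.intercalate]
        have htr : pvTrail (c :: t) = [] := by
          rw [pvTrail]
          split
          · rfl
          · rcases hg : (c :: t).getLast? with _ | x
            · simp
            · have hx : x ∈ c :: t := List.mem_of_getLast? hg
              rw [hl] at hx
              simp [hrun x hx]
        rw [hcr, htr, List.append_nil,
          show pvLead ([] : List Char) = [] from rfl,
          show pvCore ([] : List Char) = [] from by rw [pvCore, pvTokens_nil]; simp [List.intercalate],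
          show pvTrail ([] : List Char) = [] from by rw [pvTrail, if_pos pvTokens_nil]]
        simp
      · -- rest starts with a non-alnum char d
        have hd : PySem.Chars.isalnum d = false := by
          have := List.head?_dropWhile_not (fun x => PySem.Chars.isalnum x == PySem.Chars.isalnum c) t
          rw [hrest] at this
          simp only [List.head?_cons] at this
          rw [h] at this
          simpa using this
        have hsuf : (d :: t') <:+ (c :: t) := by
          rw [← hrest]
          exact (List.dropWhile_suffix _).trans (List.suffix_cons c t)
        have hlast : (d :: t').getLast? = (c :: t).getLast? :=
          pvGetLast?_suffix _ _ hsuf (by simp)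
        rw [show pvLead (d :: t') = ['-'] from by rw [pvLead, if_neg (by simp [hd])]]
        have htokl : pvTokens (c :: t)
            = (c :: t.takeWhile (fun x => PySem.Chars.isalnum x == PySem.Chars.isalnum c)) :: pvTokens (d :: t') := by
          rw [pvTokens_cons_alnum c t h, hrest]
        by_cases hts : pvTokens (d :: t') = []
        · have hcr2 : pvCore (d :: t') = [] := by rw [pvCore, hts]; simp [List.intercalate]
          have htr2 : pvTrail (d :: t') = [] := by rw [pvTrail, if_pos hts]
          have hcr : pvCore (c :: t)
              = c :: t.takeWhile (fun x => PySem.Chars.isalnum x == PySem.Chars.isalnum c) := by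
            rw [pvCore, htokl, hts]
            simp [List.intercalate]
          have htr : pvTrail (c :: t) = ['-'] := by
            rcases hg : (d :: t').getLast? with _ | x
            · simp at hg
            · have hx : x ∈ d :: t' := List.mem_of_getLast? hg
              have hxn : PySem.Chars.isalnum x = false := (pvTokens_nil_iff _).mp hts x hx
              rw [pvTrail, if_neg (by rw [htokl]; simp), ← hlast, hg]
              simp [hxn]
          rw [hcr, htr, hcr2, htr2]
          simp
        · have hic : pvCore (c :: t)
              = (c :: t.takeWhile (fun x => PySem.Chars.isalnum x == PySem.Chars.isalnum c))
                ++ ['-'] ++ pvCore (d :: t') := by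
            rw [pvCore, pvCore, htokl]
            rcases hts2 : pvTokens (d :: t') with _ | ⟨y, ys⟩
            · exact absurd hts2 hts
            · simp [List.intercalate, List.intersperse]
          have htr : pvTrail (c :: t) = pvTrail (d :: t') := by
            rw [pvTrail_of_ne _ (by rw [htokl]; simp), pvTrail_of_ne _ hts, hlast]
          rw [hic, htr]
          simp
    · -- non-alnum head: the run maps to dashes
      rw [Bool.not_eq_true] at h
      have hrun : ∀ a ∈ c :: t.takeWhile (fun x => PySem.Chars.isalnum x == PySem.Chars.isalnum c),
          PySem.Chars.isalnum a = false := by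
        intro a ha
        rcases List.mem_cons.mp ha with rfl | ha
        · exact h
        · have := List.mem_takeWhile_imp ha
          rw [h] at this
          simpa using this
      rw [hwhole, pvMap_rep _ hrun,
        show (c :: t.takeWhile (fun x => PySem.Chars.isalnum x == PySem.Chars.isalnum c)).length
          = (t.takeWhile (fun x => PySem.Chars.isalnum x == PySem.Chars.isalnum c)).length + 1 from by simp,
        pvSq_replicate]
      rw [pvLead, if_neg (by simp [h])]
      have htok : pvTokens (c :: t) = pvTokens (t.dropWhile (fun x => PySem.Chars.isalnum x == PySem.Chars.isalnum c)) :=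
        pvTokens_cons_not c t h
      rcases hrest : t.dropWhile (fun x => PySem.Chars.isalnum x == PySem.Chars.isalnum c) with _ | ⟨d, t'⟩
      · -- whole string non-alnum
        have hcr : pvCore (c :: t) = [] := by
          rw [pvCore, htok, hrest, pvTokens_nil]; simp [List.intercalate]
        have htr : pvTrail (c :: t) = [] := by
          rw [pvTrail, if_pos (by rw [htok, hrest, pvTokens_nil])]
        rw [hcr, htr]
        rfl
      · have hd : PySem.Chars.isalnum d = true := by
          have := List.head?_dropWhile_not (fun x => PySem.Chars.isalnum x == PySem.Chars.isalnum c) t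
          rw [hrest] at this
          simp only [List.head?_cons] at this
          rw [h] at this
          simpa using this
        have hsuf : (d :: t') <:+ (c :: t) := by
          rw [← hrest]
          exact (List.dropWhile_suffix _).trans (List.suffix_cons c t)
        have hlast : (d :: t').getLast? = (c :: t).getLast? :=
          pvGetLast?_suffix _ _ hsuf (by simp)
        have hhead : ((d :: t').map pvF).head? ≠ some '-' := by
          simp only [List.map_cons, List.head?_cons, ne_eq, Option.some.injEq]
          rw [pvF, if_pos hd]
          exact pvAlnum_ne_dash d hd
        rw [hrest] at ih htok
        rw [pvSq_cons_head _ _ hhead, ih,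
          show pvLead (d :: t') = [] from by rw [pvLead, if_pos hd], List.nil_append]
        have hcr : pvCore (c :: t) = pvCore (d :: t') := by rw [pvCore, pvCore, htok]
        have htr : pvTrail (c :: t) = pvTrail (d :: t') := by
          by_cases hts : pvTokens (d :: t') = []
          · rw [pvTrail, pvTrail, if_pos (by rw [htok, hts]), if_pos hts]
          · rw [pvTrail_of_ne _ (by rw [htok]; exact hts), pvTrail_of_ne _ hts, hlast]
        rw [hcr, htr]
        rfl
termination_by l.length
decreasing_by exact hrec

-- stripping
theorem pvIcHead (ts : List (List Char))
    (hwf : ∀ tk ∈ ts, tk ≠ [] ∧ ∀ a ∈ tk, PySem.Chars.isalnum a = true) (h : ts ≠ []) :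
    ∃ a, (List.intercalate ['-'] ts).head? = some a ∧ PySem.Chars.isalnum a = true := by
  match ts with
  | [] => exact absurd rfl h
  | tk :: ts' =>
    obtain ⟨hne, hal⟩ := hwf tk (by simp)
    obtain ⟨x, tk', rfl⟩ : ∃ x tk', tk = x :: tk' := by
      cases tk with
      | nil => exact absurd rfl hne
      | cons x tk' => exact ⟨x, tk', rfl⟩
    cases ts' with
    | nil => exact ⟨x, by simp [List.intercalate], hal x (by simp)⟩
    | cons y ys => exact ⟨x, by simp [List.intercalate, List.intersperse], hal x (by simp)⟩

theorem pvIcLast (ts : List (List Char))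
    (hwf : ∀ tk ∈ ts, tk ≠ [] ∧ ∀ a ∈ tk, PySem.Chars.isalnum a = true) (h : ts ≠ []) :
    ∃ a, (List.intercalate ['-'] ts).getLast? = some a ∧ PySem.Chars.isalnum a = true := by
  match ts with
  | [] => exact absurd rfl h
  | [tk] =>
    obtain ⟨hne, hal⟩ := hwf tk (by simp)
    obtain ⟨a, ha⟩ := Option.isSome_iff_exists.mp (List.getLast?_isSome.mpr hne)
    exact ⟨a, by simp [List.intercalate, ha], hal a (List.mem_of_getLast? ha)⟩
  | tk :: y :: ys =>
    obtain ⟨a, hga, haal⟩ := pvIcLast (y :: ys)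
      (fun t ht => hwf t (by simp [ht])) (by simp)
    have hic : List.intercalate ['-'] (tk :: y :: ys)
        = tk ++ ['-'] ++ List.intercalate ['-'] (y :: ys) := by
      simp [List.intercalate, List.intersperse]
    refine ⟨a, ?_, haal⟩
    rw [hic, List.getLast?_append, List.getLast?_append, hga, Option.some_or]

theorem pvLead_cases (l : List Char) : pvLead l = [] ∨ pvLead l = ['-'] := by
  match l with
  | [] => exact Or.inl rfl
  | c :: t =>
    rw [pvLead]
    split_ifs
    · exact Or.inl rfl
    · exact Or.inr rfl

theorem pvTrail_cases (l : List Char) : pvTrail l = [] ∨ pvTrail l = ['-'] := by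
  rw [pvTrail]
  split
  · exact Or.inl rfl
  · rcases hg : l.getLast? with _ | x
    · exact Or.inl rfl
    · by_cases hx : PySem.Chars.isalnum x = true
      · exact Or.inl (by simp [hx])
      · exact Or.inr (by simp [hx])

theorem pvStrip_eq (l : List Char) :
    PySem.Chars.stripChars (pvLead l ++ pvCore l ++ pvTrail l) ['-'] = pvCore l := by
  have hstrip : ∀ s : List Char, PySem.Chars.stripChars s ['-']
      = (List.dropWhile (fun c => (['-'] : List Char).contains c)
          ((List.dropWhile (fun c => (['-'] : List Char).contains c) s).reverse)).reverse :=
    fun s => rfl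
  by_cases hts : pvTokens l = []
  · have hcr : pvCore l = [] := by rw [pvCore, hts]; simp [List.intercalate]
    have htr : pvTrail l = [] := by rw [pvTrail, if_pos hts]
    rw [hcr, htr, List.append_nil, List.append_nil]
    rcases pvLead_cases l with hl | hl <;> rw [hl, hstrip]
    · simp
    · simp
  · obtain ⟨a, hha, haal⟩ := pvIcHead (pvTokens l) (pvTokens_wf l) hts
    obtain ⟨b, hgb, hbal⟩ := pvIcLast (pvTokens l) (pvTokens_wf l) hts
    have hha' : (pvCore l).head? = some a := by rw [pvCore]; exact hha
    have hgb' : (pvCore l).getLast? = some b := by rw [pvCore]; exact hgb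
    have hane : a ≠ '-' := pvAlnum_ne_dash a haal
    have hbne : b ≠ '-' := pvAlnum_ne_dash b hbal
    obtain ⟨cs, hcore⟩ : ∃ cs, pvCore l = a :: cs := by
      rcases hc : pvCore l with _ | ⟨a', cs⟩
      · rw [hc] at hha'; simp at hha'
      · rw [hc] at hha'; simp at hha'
        exact ⟨cs, by rw [hha']⟩
    -- step 1: strip the (all-dash) lead
    have hstep1 : List.dropWhile (fun c => (['-'] : List Char).contains c)
        (pvLead l ++ pvCore l ++ pvTrail l) = pvCore l ++ pvTrail l := by
      have hcore1 : List.dropWhile (fun c => (['-'] : List Char).contains c)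
          (pvCore l ++ pvTrail l) = pvCore l ++ pvTrail l := by
        rw [hcore, List.cons_append, List.dropWhile_cons, if_neg (by simp [hane])]
      rcases pvLead_cases l with hl | hl <;> rw [hl]
      · rw [List.nil_append]; exact hcore1
      · rw [List.append_assoc, List.singleton_append, List.dropWhile_cons, if_pos (by simp)]
        exact hcore1
    -- step 2: reverse, strip the (all-dash) trail
    obtain ⟨rs, hrev⟩ : ∃ rs, (pvCore l).reverse = b :: rs := by
      rcases hr : (pvCore l).reverse with _ | ⟨b', rs⟩
      · have : pvCore l = [] := by simpa using congrArg List.reverse hr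
        rw [this] at hgb'; simp at hgb'
      · have : (pvCore l).reverse.head? = some b' := by rw [hr]; rfl
        rw [List.head?_reverse, hgb'] at this
        simp at this
        exact ⟨rs, by rw [this]⟩
    have hstep2 : List.dropWhile (fun c => (['-'] : List Char).contains c)
        ((pvCore l ++ pvTrail l).reverse) = (pvCore l).reverse := by
      rw [List.reverse_append]
      have hcore2 : List.dropWhile (fun c => (['-'] : List Char).contains c)
          ((pvCore l).reverse) = (pvCore l).reverse := by
        rw [hrev, List.dropWhile_cons, if_neg (by simp [hbne])]
      rcases pvTrail_cases l with htl | htl <;> rw [htl]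
      · rw [List.reverse_nil, List.nil_append]; exact hcore2
      · rw [show (['-'] : List Char).reverse = ['-'] from rfl, List.singleton_append,
          List.dropWhile_cons, if_pos (by simp)]
        exact hcore2
    rw [hstrip, hstep1, hstep2, List.reverse_reverse]

-- ===== VERDICT (by name: the statement is the Claim_ definition above) =====
theorem sanitize_val_py_spec : Claim_equal_sanitize_val_py := by
  intro v _
  unfold Spec_sanitize_val_py sanitize_val_py sanitize_val_py_alt
  have hmap : v.toList.map (fun ch =>
      if PySem.Chars.isalnum ch then ch
      else if ['.', ':', '-'].contains ch then '-'
      else if [' ', ',', '/', '[', ']', '{', '}'].contains ch then '-'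
      else '-') = v.toList.map pvF := by
    apply List.map_congr_left
    intro a _
    unfold pvF
    split_ifs <;> rfl
  simp only [hmap, pvCollapse_eq, pvMain, pvStrip_eq]
  rfl
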